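-- pv_equiv track=rewrite | github.com/sakanastudio24-eng/Price-optomization | code-price-optimization/scripts/diagnose_cost_plan.py | phase_actions
-- ===== SOURCE A (Python) =====
-- from typing import Dict, List, Set
--
-- def phase_actions(actions: List[Dict[str, object]]) -> Dict[str, List[str]]:
--     immediate = [a["title"] for a in actions[:4]]
--     medium = [a["title"] for a in actions[4:9]]
--     follow_up = [a["title"] for a in actions[9:]]
--     return {
--         "0-14_days": immediate,
--         "15-45_days": medium,
--         "46-90_days": follow_up,
--     }
-- ===== SOURCE B (Python) =====
-- def phase_actions(actions):
--     # Capacity-driven consumption of a single iterator: each phase pulls up to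
--     # its capacity of items (None = the rest), instead of slicing by index.
--     it = iter(actions)
--     plan = {}
--     for key, cap in (("0-14_days", 4), ("15-45_days", 5), ("46-90_days", None)):
--         titles = []
--         while cap is None or len(titles) < cap:
--             try:
--                 a = next(it)
--             except StopIteration:
--                 break
--             titles.append(a["title"])
--         plan[key] = titles
--     return plan
-- ===== Notes on version B (the rewrite author's own statement) =====
-- stated objective: alternative
-- what changed: replaced the three index-based slice comprehensions by an outer loop over a (phase, capacity) table whose inner loop consumes up to that capacity of actions from a single shared iterator
import Mathlib
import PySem

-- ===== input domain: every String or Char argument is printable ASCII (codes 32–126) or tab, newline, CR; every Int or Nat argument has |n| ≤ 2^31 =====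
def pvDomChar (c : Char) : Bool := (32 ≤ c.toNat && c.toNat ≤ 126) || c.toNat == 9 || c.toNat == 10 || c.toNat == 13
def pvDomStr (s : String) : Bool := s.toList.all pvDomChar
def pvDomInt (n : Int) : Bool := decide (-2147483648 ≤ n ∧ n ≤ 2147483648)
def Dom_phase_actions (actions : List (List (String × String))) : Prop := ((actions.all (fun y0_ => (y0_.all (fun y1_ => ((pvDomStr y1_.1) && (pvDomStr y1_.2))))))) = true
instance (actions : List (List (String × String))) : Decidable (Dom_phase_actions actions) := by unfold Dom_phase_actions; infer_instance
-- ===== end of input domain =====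

-- B replaces A's three index-based slices by one shared iterator consumed phase by phase
-- from a (key, capacity) table; same cost, different decomposition.

-- shared helper: a["title"] as first-match association-list lookup (Pre_ guarantees the key exists)
def pvTitle (a : List (String × String)) : String :=
  ((a.find? (fun p => p.1 == "title")).map Prod.snd).getD ""

-- ===== PORT A =====
def phase_actions (actions : List (List (String × String))) : List (String × List String) :=
  let immediate := (PySem.List.slice actions none (some 4)).map pvTitle
  let medium := (PySem.List.slice actions (some 4) (some 9)).map pvTitle
  let follow_up := (PySem.List.slice actions (some 9) none).map pvTitle
  [("0-14_days", immediate), ("15-45_days", medium), ("46-90_days", follow_up)]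

-- ===== PORT B =====
-- the inner while loop of Source B: pull up to `cap` items (none = all) off the iterator,
-- returning the collected titles and the unconsumed remainder of the iterator
def pvConsume : Option Nat → List (List (String × String)) → List String × List (List (String × String))
  | some 0, rest => ([], rest)
  | _, [] => ([], [])
  | some (n+1), a :: rest =>
      let r := pvConsume (some n) rest
      (pvTitle a :: r.1, r.2)
  | none, a :: rest =>
      let r := pvConsume none rest
      (pvTitle a :: r.1, r.2)

def phase_actions_alt (actions : List (List (String × String))) : List (String × List String) :=
  let go := fun (st : List (String × List String) × List (List (String × String)))
                (p : String × Option Nat) =>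
    let r := pvConsume p.2 st.2
    (st.1 ++ [(p.1, r.1)], r.2)
  (([("0-14_days", some 4), ("15-45_days", some 5), ("46-90_days", none)] :
      List (String × Option Nat)).foldl go ([], actions)).1

-- ===== PRECONDITION & SPEC =====
-- Pre_ excludes exactly the inputs where some action lacks a "title" key: there Python A raises KeyError.
def Pre_phase_actions (actions : List (List (String × String))) : Prop :=
  actions.all (fun a => a.any (fun p => p.1 == "title")) = true
instance (actions : List (List (String × String))) : Decidable (Pre_phase_actions actions) := by
  unfold Pre_phase_actions; infer_instance

def pvWitness_phase_actions : (List (List (String × String))) := [[("title", "fix pricing")]]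

def Spec_phase_actions (actions : List (List (String × String))) (out : List (String × List String)) : Prop := out = phase_actions_alt actions
instance (actions : List (List (String × String))) (out : List (String × List String)) : Decidable (Spec_phase_actions actions out) := by unfold Spec_phase_actions; infer_instance

-- ===== CLAIM (what is proved, stated in full; the proofs are below) =====
def Claim_equal_phase_actions : Prop := ∀ (actions : List (List (String × String))), Dom_phase_actions actions → Pre_phase_actions actions → Spec_phase_actions actions (phase_actions actions)

-- ===== LEMMAS AND PROOFS =====

theorem pvConsume_some (n : Nat) (xs : List (List (String × String))) :
    pvConsume (some n) xs = ((xs.take n).map pvTitle, xs.drop n) := by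
  induction n generalizing xs with
  | zero => simp [pvConsume]
  | succ n ih =>
    cases xs with
    | nil => simp [pvConsume]
    | cons a rest => simp [pvConsume, ih]

theorem pvConsume_none (xs : List (List (String × String))) :
    pvConsume none xs = (xs.map pvTitle, []) := by
  induction xs with
  | nil => simp [pvConsume]
  | cons a rest ih => simp [pvConsume, ih]

-- ===== VERDICT (by name: the statement is the Claim_ definition above) =====
theorem phase_actions_spec : Claim_equal_phase_actions := by
  intro actions _ _
  unfold Spec_phase_actions phase_actions phase_actions_alt
  dsimp only
  rw [PySem.List.slice_to actions (by norm_num),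
    PySem.List.slice_toNat actions (by norm_num) (by norm_num),
    PySem.List.slice_from actions (by norm_num)]
  simp [List.foldl, pvConsume_some, pvConsume_none, List.drop_drop]
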